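-- pv_equiv track=rewrite | github.com/1Generic1/alx-interview | 0x05-nqueens/xsort.py | identify_email_service
-- ===== SOURCE A (Python) =====
-- def identify_email_service(mx_servers):
--     """Enhanced email service detection including web hosts"""
--     mx_servers_lower = [server.lower() for server in mx_servers]
--
--     # Google Workspace / Gmail
--     if any('google' in server or 'aspmx.l.google.com' in server for server in mx_servers_lower):
--         return 'Google Workspace'
--
--     # Microsoft 365 / Outlook
--     elif any('outlook' in server or 'protection.outlook' in server or 'mail.protection' in server for server in mx_servers_lower):
--         return 'Microsoft 365'
--
--     # Amazon SES
--     elif any('amazonaws' in server or 'ses' in server for server in mx_servers_lower):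
--         return 'Amazon SES'
--
--     # Web Hosting Services
--     elif any('secureserver' in server or 'godaddy' in server for server in mx_servers_lower):
--         return 'GoDaddy Email'
--
--     elif any('bluehost' in server for server in mx_servers_lower):
--         return 'Bluehost Email'
--
--     elif any('hostgator' in server for server in mx_servers_lower):
--         return 'HostGator Email'
--
--     elif any('siteground' in server for server in mx_servers_lower):
--         return 'SiteGround Email'
--
--     elif any('namecheap' in server or 'privateemail' in server for server in mx_servers_lower):
--         return 'Namecheap Email'
--
--     elif any('dreamhost' in server for server in mx_servers_lower):
--         return 'DreamHost Email'
--
--     elif any('cpanel' in server or 'cpane' in server for server in mx_servers_lower):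
--         return 'cPanel Hosting'
--
--     elif any('cloudflare' in server for server in mx_servers_lower):
--         return 'Cloudflare Email'
--
--     # Other Email Services
--     elif any('zoho' in server for server in mx_servers_lower):
--         return 'Zoho Mail'
--
--     elif any('yahoo' in server for server in mx_servers_lower):
--         return 'Yahoo Mail'
--
--     elif any('protonmail' in server or 'proton' in server for server in mx_servers_lower):
--         return 'ProtonMail'
--
--     elif any('fastmail' in server for server in mx_servers_lower):
--         return 'Fastmail'
--
--     elif any('sendgrid' in server for server in mx_servers_lower):
--         return 'SendGrid'
--
--     elif any('mailgun' in server for server in mx_servers_lower):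
--         return 'Mailgun'
--
--     elif any('postmark' in server for server in mx_servers_lower):
--         return 'Postmark'
--
--     # Additional providers for better accuracy
--     elif any('rackspace' in server for server in mx_servers_lower):
--         return 'Rackspace Email'
--
--     elif any('ionos' in server or '1and1' in server for server in mx_servers_lower):
--         return 'IONOS Email'
--
--     elif any('network solutions' in server or 'netsol' in server for server in mx_servers_lower):
--         return 'Network Solutions'
--
--     elif any('wix' in server for server in mx_servers_lower):
--         return 'Wix Email'
--
--     elif any('squarespace' in server for server in mx_servers_lower):
--         return 'Squarespace Email'
--
--     # Generic hosting patterns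
--     elif any('mx' in server and ('host' in server or 'server' in server or 'web' in server) for server in mx_servers_lower):
--         return 'Generic Web Hosting'
--
--     else:
--         return 'Custom/Unknown'
-- ===== SOURCE B (Python) =====
-- # Different algorithm: instead of 24 if/elif scans over the whole server list,
-- # make ONE pass over the servers, score each server with its best (lowest) rule
-- # priority, and keep the running minimum (early exit at priority 0); the answer
-- # is the label table indexed by the best priority found.
--
-- _SUBS = [
--     ['google', 'aspmx.l.google.com'],
--     ['outlook', 'protection.outlook', 'mail.protection'],
--     ['amazonaws', 'ses'],
--     ['secureserver', 'godaddy'],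
--     ['bluehost'],
--     ['hostgator'],
--     ['siteground'],
--     ['namecheap', 'privateemail'],
--     ['dreamhost'],
--     ['cpanel', 'cpane'],
--     ['cloudflare'],
--     ['zoho'],
--     ['yahoo'],
--     ['protonmail', 'proton'],
--     ['fastmail'],
--     ['sendgrid'],
--     ['mailgun'],
--     ['postmark'],
--     ['rackspace'],
--     ['ionos', '1and1'],
--     ['network solutions', 'netsol'],
--     ['wix'],
--     ['squarespace'],
-- ]
--
-- _LABELS = [
--     'Google Workspace', 'Microsoft 365', 'Amazon SES', 'GoDaddy Email',
--     'Bluehost Email', 'HostGator Email', 'SiteGround Email', 'Namecheap Email',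
--     'DreamHost Email', 'cPanel Hosting', 'Cloudflare Email', 'Zoho Mail',
--     'Yahoo Mail', 'ProtonMail', 'Fastmail', 'SendGrid', 'Mailgun', 'Postmark',
--     'Rackspace Email', 'IONOS Email', 'Network Solutions', 'Wix Email',
--     'Squarespace Email', 'Generic Web Hosting', 'Custom/Unknown',
-- ]
--
--
-- def _priority(s):
--     """Lowest rule index matched by one (lowercased) server; 24 if none."""
--     i = 0
--     for subs in _SUBS:
--         for sub in subs:
--             if sub in s:
--                 return i
--         i += 1
--     if 'mx' in s and ('host' in s or 'server' in s or 'web' in s):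
--         return 23
--     return 24
--
--
-- def identify_email_service(mx_servers):
--     """Enhanced email service detection including web hosts"""
--     best = 24
--     for server in mx_servers:
--         p = _priority(server.lower())
--         if p < best:
--             best = p
--             if best == 0:
--                 break
--     return _LABELS[best]
-- ===== Notes on version B (the rewrite author's own statement) =====
-- stated objective: alternative
-- what changed: Instead of 24 if/elif branches each scanning the whole server list, B makes one pass over the servers, scores each server with its lowest matching rule index (priority), keeps the running minimum with an early exit at priority 0, and indexes a label table with the best priority.
import Mathlib
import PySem

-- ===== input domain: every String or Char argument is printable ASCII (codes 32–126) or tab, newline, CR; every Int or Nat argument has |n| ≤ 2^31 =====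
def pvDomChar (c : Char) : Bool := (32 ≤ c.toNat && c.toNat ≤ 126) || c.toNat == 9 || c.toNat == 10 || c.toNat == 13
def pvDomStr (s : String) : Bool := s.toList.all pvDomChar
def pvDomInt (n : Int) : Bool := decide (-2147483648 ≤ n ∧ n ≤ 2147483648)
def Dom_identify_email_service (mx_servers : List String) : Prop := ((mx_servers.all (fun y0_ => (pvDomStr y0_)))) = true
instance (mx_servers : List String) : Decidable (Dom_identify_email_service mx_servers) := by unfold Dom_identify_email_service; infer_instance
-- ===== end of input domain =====

-- B replaces A's 24-branch chain of whole-list scans with a single pass over the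
-- servers keeping the minimum rule priority per server (alternative decomposition).

-- ===== PORT A =====
-- A: lowercase all servers once, then a 24-branch if/elif chain, each branch an
-- 'any' scan of the lowered list for its substrings.
def identify_email_service (mx_servers : List String) : String :=
  let mx_servers_lower := mx_servers.map PySem.Str.lower
  if mx_servers_lower.any (fun server => PySem.Str.isIn "google" server || PySem.Str.isIn "aspmx.l.google.com" server) then "Google Workspace"
  else if mx_servers_lower.any (fun server => PySem.Str.isIn "outlook" server || PySem.Str.isIn "protection.outlook" server || PySem.Str.isIn "mail.protection" server) then "Microsoft 365"
  else if mx_servers_lower.any (fun server => PySem.Str.isIn "amazonaws" server || PySem.Str.isIn "ses" server) then "Amazon SES"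
  else if mx_servers_lower.any (fun server => PySem.Str.isIn "secureserver" server || PySem.Str.isIn "godaddy" server) then "GoDaddy Email"
  else if mx_servers_lower.any (fun server => PySem.Str.isIn "bluehost" server) then "Bluehost Email"
  else if mx_servers_lower.any (fun server => PySem.Str.isIn "hostgator" server) then "HostGator Email"
  else if mx_servers_lower.any (fun server => PySem.Str.isIn "siteground" server) then "SiteGround Email"
  else if mx_servers_lower.any (fun server => PySem.Str.isIn "namecheap" server || PySem.Str.isIn "privateemail" server) then "Namecheap Email"
  else if mx_servers_lower.any (fun server => PySem.Str.isIn "dreamhost" server) then "DreamHost Email"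
  else if mx_servers_lower.any (fun server => PySem.Str.isIn "cpanel" server || PySem.Str.isIn "cpane" server) then "cPanel Hosting"
  else if mx_servers_lower.any (fun server => PySem.Str.isIn "cloudflare" server) then "Cloudflare Email"
  else if mx_servers_lower.any (fun server => PySem.Str.isIn "zoho" server) then "Zoho Mail"
  else if mx_servers_lower.any (fun server => PySem.Str.isIn "yahoo" server) then "Yahoo Mail"
  else if mx_servers_lower.any (fun server => PySem.Str.isIn "protonmail" server || PySem.Str.isIn "proton" server) then "ProtonMail"
  else if mx_servers_lower.any (fun server => PySem.Str.isIn "fastmail" server) then "Fastmail"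
  else if mx_servers_lower.any (fun server => PySem.Str.isIn "sendgrid" server) then "SendGrid"
  else if mx_servers_lower.any (fun server => PySem.Str.isIn "mailgun" server) then "Mailgun"
  else if mx_servers_lower.any (fun server => PySem.Str.isIn "postmark" server) then "Postmark"
  else if mx_servers_lower.any (fun server => PySem.Str.isIn "rackspace" server) then "Rackspace Email"
  else if mx_servers_lower.any (fun server => PySem.Str.isIn "ionos" server || PySem.Str.isIn "1and1" server) then "IONOS Email"
  else if mx_servers_lower.any (fun server => PySem.Str.isIn "network solutions" server || PySem.Str.isIn "netsol" server) then "Network Solutions"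
  else if mx_servers_lower.any (fun server => PySem.Str.isIn "wix" server) then "Wix Email"
  else if mx_servers_lower.any (fun server => PySem.Str.isIn "squarespace" server) then "Squarespace Email"
  else if mx_servers_lower.any (fun server => PySem.Str.isIn "mx" server && (PySem.Str.isIn "host" server || PySem.Str.isIn "server" server || PySem.Str.isIn "web" server)) then "Generic Web Hosting"
  else "Custom/Unknown"

-- ===== PORT B =====
-- B: substring table and label table (Source B's _SUBS / _LABELS).
def pvSubs : List (List String) :=
  [ ["google", "aspmx.l.google.com"],
    ["outlook", "protection.outlook", "mail.protection"],
    ["amazonaws", "ses"],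
    ["secureserver", "godaddy"],
    ["bluehost"],
    ["hostgator"],
    ["siteground"],
    ["namecheap", "privateemail"],
    ["dreamhost"],
    ["cpanel", "cpane"],
    ["cloudflare"],
    ["zoho"],
    ["yahoo"],
    ["protonmail", "proton"],
    ["fastmail"],
    ["sendgrid"],
    ["mailgun"],
    ["postmark"],
    ["rackspace"],
    ["ionos", "1and1"],
    ["network solutions", "netsol"],
    ["wix"],
    ["squarespace"] ]

def pvLabels : List String :=
  [ "Google Workspace", "Microsoft 365", "Amazon SES", "GoDaddy Email",
    "Bluehost Email", "HostGator Email", "SiteGround Email", "Namecheap Email",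
    "DreamHost Email", "cPanel Hosting", "Cloudflare Email", "Zoho Mail",
    "Yahoo Mail", "ProtonMail", "Fastmail", "SendGrid", "Mailgun", "Postmark",
    "Rackspace Email", "IONOS Email", "Network Solutions", "Wix Email",
    "Squarespace Email", "Generic Web Hosting", "Custom/Unknown" ]

-- _priority's for-loop over _SUBS with the running index i, then the two tail returns
def pvPriorityAux (s : String) : List (List String) → Nat → Nat
  | [], _ =>
      if PySem.Str.isIn "mx" s && (PySem.Str.isIn "host" s || PySem.Str.isIn "server" s || PySem.Str.isIn "web" s) then 23
      else 24
  | subs :: rest, i =>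
      if subs.any (fun sub => PySem.Str.isIn sub s) then i
      else pvPriorityAux s rest (i + 1)

def pvPriority (s : String) : Nat := pvPriorityAux s pvSubs 0

-- the main loop: running minimum priority with early break at 0
def pvLoop : List String → Nat → Nat
  | [], best => best
  | server :: rest, best =>
      let p := pvPriority (PySem.Str.lower server)
      if p < best then (if p == 0 then p else pvLoop rest p) else pvLoop rest best

def identify_email_service_alt (mx_servers : List String) : String :=
  -- _LABELS[best]: best is always a valid non-negative index (≤ 24), so getD is exact
  pvLabels.getD (pvLoop mx_servers 24) ""

-- ===== PRECONDITION & SPEC =====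
def Spec_identify_email_service (mx_servers : List String) (out : String) : Prop := out = identify_email_service_alt mx_servers
instance (mx_servers : List String) (out : String) : Decidable (Spec_identify_email_service mx_servers out) := by unfold Spec_identify_email_service; infer_instance

-- ===== CLAIM (what is proved, stated in full; the proofs are below) =====
def Claim_equal_identify_email_service : Prop := ∀ (mx_servers : List String), Dom_identify_email_service mx_servers → Spec_identify_email_service mx_servers (identify_email_service mx_servers)

-- ===== LEMMAS AND PROOFS =====

-- A's rules as (condition, label) pairs, in branch order (conditions are A's exact lambdas)
def pvRulesP : List ((String → Bool) × String) :=
  [ ((fun server => PySem.Str.isIn "google" server || PySem.Str.isIn "aspmx.l.google.com" server), "Google Workspace"),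
    ((fun server => PySem.Str.isIn "outlook" server || PySem.Str.isIn "protection.outlook" server || PySem.Str.isIn "mail.protection" server), "Microsoft 365"),
    ((fun server => PySem.Str.isIn "amazonaws" server || PySem.Str.isIn "ses" server), "Amazon SES"),
    ((fun server => PySem.Str.isIn "secureserver" server || PySem.Str.isIn "godaddy" server), "GoDaddy Email"),
    ((fun server => PySem.Str.isIn "bluehost" server), "Bluehost Email"),
    ((fun server => PySem.Str.isIn "hostgator" server), "HostGator Email"),
    ((fun server => PySem.Str.isIn "siteground" server), "SiteGround Email"),
    ((fun server => PySem.Str.isIn "namecheap" server || PySem.Str.isIn "privateemail" server), "Namecheap Email"),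
    ((fun server => PySem.Str.isIn "dreamhost" server), "DreamHost Email"),
    ((fun server => PySem.Str.isIn "cpanel" server || PySem.Str.isIn "cpane" server), "cPanel Hosting"),
    ((fun server => PySem.Str.isIn "cloudflare" server), "Cloudflare Email"),
    ((fun server => PySem.Str.isIn "zoho" server), "Zoho Mail"),
    ((fun server => PySem.Str.isIn "yahoo" server), "Yahoo Mail"),
    ((fun server => PySem.Str.isIn "protonmail" server || PySem.Str.isIn "proton" server), "ProtonMail"),
    ((fun server => PySem.Str.isIn "fastmail" server), "Fastmail"),
    ((fun server => PySem.Str.isIn "sendgrid" server), "SendGrid"),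
    ((fun server => PySem.Str.isIn "mailgun" server), "Mailgun"),
    ((fun server => PySem.Str.isIn "postmark" server), "Postmark"),
    ((fun server => PySem.Str.isIn "rackspace" server), "Rackspace Email"),
    ((fun server => PySem.Str.isIn "ionos" server || PySem.Str.isIn "1and1" server), "IONOS Email"),
    ((fun server => PySem.Str.isIn "network solutions" server || PySem.Str.isIn "netsol" server), "Network Solutions"),
    ((fun server => PySem.Str.isIn "wix" server), "Wix Email"),
    ((fun server => PySem.Str.isIn "squarespace" server), "Squarespace Email"),
    ((fun server => PySem.Str.isIn "mx" server && (PySem.Str.isIn "host" server || PySem.Str.isIn "server" server || PySem.Str.isIn "web" server)), "Generic Web Hosting") ]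

def pvChain (mx : List String) : List ((String → Bool) × String) → String
  | [] => "Custom/Unknown"
  | (c, _l) :: rest => if mx.any c then _l else pvChain mx rest

def pvMinIdx (s : String) : List (String → Bool) → Nat
  | [] => 0
  | c :: cs => if c s then 0 else pvMinIdx s cs + 1

def pvListMin (mx : List String) (cs : List (String → Bool)) : Nat :=
  mx.foldr (fun s a => min (pvMinIdx s cs) a) cs.length

def pvToCond (subs : List String) : String → Bool := fun s => subs.any (fun sub => PySem.Str.isIn sub s)
def pvGen : String → Bool := fun s => PySem.Str.isIn "mx" s && (PySem.Str.isIn "host" s || PySem.Str.isIn "server" s || PySem.Str.isIn "web" s)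
def pvCondList : List (String → Bool) := pvSubs.map pvToCond ++ [pvGen]

theorem pvMinIdx_le (s : String) (cs : List (String → Bool)) : pvMinIdx s cs ≤ cs.length := by
  induction cs with
  | nil => simp [pvMinIdx]
  | cons c cs ih => simp only [pvMinIdx, List.length_cons]; split <;> omega

theorem pvListMin_le (mx : List String) (cs : List (String → Bool)) : pvListMin mx cs ≤ cs.length := by
  induction mx with
  | nil => simp [pvListMin]
  | cons s mx ih =>
      simp only [pvListMin, List.foldr_cons] at *
      exact le_trans (min_le_right _ _) ih

theorem pvListMin_nil_cs (mx : List String) : pvListMin mx [] = 0 := by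
  induction mx with
  | nil => simp [pvListMin]
  | cons s mx ih => simp only [pvListMin, List.foldr_cons]; simp [pvMinIdx]

theorem pvListMin_shift (mx : List String) (c : String → Bool) (cs : List (String → Bool))
    (h : ∀ s ∈ mx, c s = false) : pvListMin mx (c :: cs) = pvListMin mx cs + 1 := by
  induction mx with
  | nil => simp [pvListMin]
  | cons s mx ih =>
      have hs : c s = false := h s (List.mem_cons_self ..)
      have ih' := ih (fun t ht => h t (List.mem_cons_of_mem _ ht))
      simp only [pvListMin, List.foldr_cons, List.length_cons] at ih' ⊢
      rw [ih', show pvMinIdx s (c :: cs) = pvMinIdx s cs + 1 by simp [pvMinIdx, hs]]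
      omega

theorem pvListMin_zero (mx : List String) (c : String → Bool) (cs : List (String → Bool))
    (h : mx.any c = true) : pvListMin mx (c :: cs) = 0 := by
  induction mx with
  | nil => simp at h
  | cons s mx ih =>
      simp only [List.any_cons, Bool.or_eq_true] at h
      simp only [pvListMin, List.foldr_cons, List.length_cons] at ih ⊢
      rcases h with h | h
      · simp [pvMinIdx, h]
      · rw [ih h]; simp

-- the chain is the label table indexed by the minimum matching priority
theorem pvChain_eq_getD (rules : List ((String → Bool) × String)) (mx : List String) :
    pvChain mx rules =
      ((rules.map Prod.snd) ++ ["Custom/Unknown"]).getD (pvListMin mx (rules.map Prod.fst)) "" := by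
  induction rules with
  | nil => simp [pvChain, pvListMin_nil_cs]
  | cons r rest ih =>
      obtain ⟨c, l⟩ := r
      by_cases h : mx.any c = true
      · simp [pvChain, h, pvListMin_zero _ _ _ h]
      · have h' : ∀ s ∈ mx, c s = false := by
          intro s hs
          by_contra hc
          exact h (List.any_eq_true.mpr ⟨s, hs, by simpa using hc⟩)
        simp [pvChain, h, pvListMin_shift _ _ _ h', ih]

-- _priority's loop, with the counter invariant i + |L| = 23
theorem pvPriorityAux_eq (s : String) (L : List (List String)) (i : Nat) (hi : i + L.length = 23) :
    pvPriorityAux s L i = i + pvMinIdx s (L.map pvToCond ++ [pvGen]) := by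
  induction L generalizing i with
  | nil =>
      simp only [List.length_nil] at hi
      subst hi
      simp only [pvPriorityAux, List.map_nil, List.nil_append, pvMinIdx, pvGen]
      split <;> rfl
  | cons subs rest ih =>
      simp only [List.length_cons] at hi
      simp only [pvPriorityAux, List.map_cons, List.cons_append, pvMinIdx, pvToCond]
      split
      · omega
      · rw [ih (i + 1) (by omega)]; omega

theorem pvPriority_eq (s : String) : pvPriority s = pvMinIdx s pvCondList := by
  have h := pvPriorityAux_eq s pvSubs 0 (by rfl)
  simpa [pvPriority, pvCondList] using h

-- A's condition list and B's are pointwise equal, so they give the same priority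
theorem pvMinIdx_lists_eq (s : String) :
    pvMinIdx s (pvRulesP.map Prod.fst) = pvMinIdx s pvCondList := by
  simp [pvMinIdx, pvRulesP, pvCondList, pvSubs, pvToCond, pvGen, Bool.or_assoc]

theorem pvListMin_lists_eq (mx : List String) :
    pvListMin mx (pvRulesP.map Prod.fst) = pvListMin mx pvCondList := by
  induction mx with
  | nil => rfl
  | cons s mx ih =>
      simp only [pvListMin, List.foldr_cons] at ih ⊢
      rw [pvMinIdx_lists_eq, ih]

-- the main loop computes min best (pvListMin of the lowered list)
theorem pvLoop_eq (mx : List String) (best : Nat) (hb : best ≤ 24) :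
    pvLoop mx best = min best (pvListMin (mx.map PySem.Str.lower) pvCondList) := by
  induction mx generalizing best with
  | nil =>
      simp [pvLoop, pvListMin, show pvCondList.length = 24 from rfl, Nat.min_eq_left hb]
  | cons s mx ih =>
      have hp := pvPriority_eq (PySem.Str.lower s)
      have hple : pvMinIdx (PySem.Str.lower s) pvCondList ≤ 24 := pvMinIdx_le _ _
      simp only [pvLoop, hp, List.map_cons, pvListMin, List.foldr_cons]
      have hrest := ih (pvMinIdx (PySem.Str.lower s) pvCondList) hple
      have hbest := ih best hb
      simp only [pvListMin] at hrest hbest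
      split_ifs with h1 h2
      · simp only [Nat.beq_eq_true_eq] at h2; omega
      · rw [hrest]; omega
      · rw [hbest]; omega

theorem identify_eq_chain (mx : List String) :
    identify_email_service mx = pvChain (mx.map PySem.Str.lower) pvRulesP := by
  simp only [identify_email_service, pvChain, pvRulesP]

theorem pvLabels_getD (n : Nat) (hn : n ≤ 24) :
    pvLabels.getD n "" = ((pvRulesP.map Prod.snd) ++ ["Custom/Unknown"]).getD n "" := by
  interval_cases n <;> rfl

-- ===== VERDICT (by name: the statement is the Claim_ definition above) =====
theorem identify_email_service_spec : Claim_equal_identify_email_service := by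
  intro mx _
  unfold Spec_identify_email_service identify_email_service_alt
  rw [identify_eq_chain, pvChain_eq_getD, pvLoop_eq mx 24 (le_refl _), pvListMin_lists_eq]
  have hle : pvListMin (mx.map PySem.Str.lower) pvCondList ≤ 24 := pvListMin_le _ _
  rw [Nat.min_eq_right hle, pvLabels_getD _ hle]
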